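-- pv_equiv track=rewrite | github.com/Xelagate/ZennoMetrika-v3 | Основы  Python/Функции, типизация, return/решения/task1.py | is_address_correct
-- ===== SOURCE A (Python) =====
-- def is_address_correct(wallet: str) -> bool:
--     """
--     Проверяет корректность адреса кошелька, должен быть длиной 42 символа, начинаться с 0x и содержать только цифры и буквы a-f.
--     :param wallet: адрес кошелька в любом регистре
--     :return: True если адрес корректный, иначе False
--     """
--     wallet = wallet.lower()
--     if len(wallet) != 42:
--         return False
--     if not wallet.startswith('0x'):
--         return False
--     for char in wallet[2:]:
--         if char not in '0123456789abcdef':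
--             return False
--     return True
-- ===== SOURCE B (Python) =====
-- import re
--
-- _ADDR_RE = re.compile(r'0x[0-9a-f]{40}')
--
-- def is_address_correct(wallet: str) -> bool:
--     return bool(_ADDR_RE.fullmatch(wallet.lower()))
-- ===== Notes on version B (the rewrite author's own statement) =====
-- stated objective: idiomatic
-- what changed: Replaces the explicit length/prefix guards and per-character scan with a single precompiled regex fullmatch of 0x[0-9a-f]{40} on the lowered string.
import Mathlib
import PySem

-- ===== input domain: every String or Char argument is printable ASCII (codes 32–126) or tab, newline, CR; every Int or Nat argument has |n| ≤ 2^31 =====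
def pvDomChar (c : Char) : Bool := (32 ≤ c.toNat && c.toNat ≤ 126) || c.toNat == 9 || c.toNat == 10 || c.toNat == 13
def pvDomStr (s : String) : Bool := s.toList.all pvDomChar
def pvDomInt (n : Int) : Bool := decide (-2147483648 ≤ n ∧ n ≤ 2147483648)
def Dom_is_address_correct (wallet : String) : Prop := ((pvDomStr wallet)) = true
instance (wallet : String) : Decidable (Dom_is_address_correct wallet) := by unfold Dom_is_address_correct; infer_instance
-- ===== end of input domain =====

-- B replaces A's length/prefix guards and per-character loop by a single anchored
-- pattern match ('0x' followed by a counted run of 40 hex-class characters), the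
-- idiomatic regex-fullmatch formulation; same cost.

-- ===== PORT A =====
-- the membership string '0123456789abcdef' of A's inner test
def pvHexA : List Char := "0123456789abcdef".toList

def is_address_correct (wallet : String) : Bool :=
  let w := PySem.Str.lower wallet
  if PySem.Str.len w ≠ 42 then false
  else if ¬ (PySem.Str.startswith w "0x") then false
  else
    -- for char in wallet[2:]: if char not in '…': return False; return True
    (PySem.Str.slice w (some 2) none).toList.all (fun c => pvHexA.contains c)

-- ===== PORT B =====
-- the regex character class [0-9a-f]
def pvHexClass : List Char := "0123456789abcdef".toList

-- [0-9a-f]{40}$ : exactly n characters of the class, then end of string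
def pvHexRun : Nat → List Char → Bool
  | 0, [] => true
  | n + 1, c :: cs => pvHexClass.contains c && pvHexRun n cs
  | _, _ => false

-- re.fullmatch(r'0x[0-9a-f]{40}', wallet.lower()) — anchored match of the whole string
def is_address_correct_alt (wallet : String) : Bool :=
  match (PySem.Str.lower wallet).toList with
  | '0' :: 'x' :: rest => pvHexRun 40 rest
  | _ => false

-- ===== PRECONDITION & SPEC =====
def Spec_is_address_correct (wallet : String) (out : Bool) : Prop := out = is_address_correct_alt wallet
instance (wallet : String) (out : Bool) : Decidable (Spec_is_address_correct wallet out) := by unfold Spec_is_address_correct; infer_instance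

-- ===== CLAIM (what is proved, stated in full; the proofs are below) =====
def Claim_equal_is_address_correct : Prop := ∀ (wallet : String), Dom_is_address_correct wallet → Spec_is_address_correct wallet (is_address_correct wallet)

-- ===== LEMMAS AND PROOFS =====

-- a counted run is: exactly that many characters, all of the class
theorem pvHexRun_eq (n : Nat) (cs : List Char) :
    pvHexRun n cs = (decide (cs.length = n) && cs.all (fun c => pvHexClass.contains c)) := by
  induction cs generalizing n with
  | nil => cases n <;> simp [pvHexRun]
  | cons c cs ih =>
      cases n with
      | zero => simp [pvHexRun]
      | succ n =>
          simp [pvHexRun, ih n, List.all_cons]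
          by_cases h : cs.length = n <;> simp [h, Bool.and_comm]

-- ===== VERDICT (by name: the statement is the Claim_ definition above) =====
theorem is_address_correct_spec : Claim_equal_is_address_correct := by
  intro wallet _
  unfold Spec_is_address_correct is_address_correct is_address_correct_alt
  simp only [PySem.Str.len, PySem.Str.startswith, PySem.Str.slice, PySem.Str.toList_lower]
  generalize PySem.Chars.lower wallet.toList = l
  match l with
  | [] => simp
  | [c] => simp
  | c0 :: c1 :: rest =>
      by_cases hlen : rest.length = 40
      · by_cases h0 : c0 = '0'
        · by_cases h1 : c1 = 'x'
          · subst h0; subst h1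
            simp [PySem.Chars.startswith, PySem.Chars.slice, hlen,
                  pvHexRun_eq, pvHexA, pvHexClass, PySem.List.slice,
                  List.take_of_length_le hlen.le]
          · simp [PySem.Chars.startswith, hlen]
            split <;> simp_all
            intro h
            exact absurd h.symm h1
        · simp [PySem.Chars.startswith, hlen]
          split <;> simp_all
          intro h _
          exact absurd h.symm h0
      · simp only [List.length_cons, pvHexRun_eq]
        rw [if_pos (by push_cast; omega)]
        split <;> simp_all
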